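-- pv_equiv track=rewrite | github.com/claudlos/Kryptos | strategy7_segmented.py | decrypt_quagmire_autokey
-- ===== SOURCE A (Python) =====
-- KRYPTOS_ALPHABET = "KRYPTOSABCDEFGHIJLMNQUVWXZ"
--
-- def build_tableau():
--     tableau = []
--     for i in range(26):
--         row = KRYPTOS_ALPHABET[i:] + KRYPTOS_ALPHABET[:i]
--         tableau.append(row)
--     return tableau
--
-- def decrypt_quagmire_char(cipher_char, key_char, tableau):
--     if key_char not in KRYPTOS_ALPHABET or cipher_char not in KRYPTOS_ALPHABET:
--         return cipher_char
--     row_idx = KRYPTOS_ALPHABET.index(key_char)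
--     row = tableau[row_idx]
--     if cipher_char in row:
--         col_idx = row.index(cipher_char)
--         return KRYPTOS_ALPHABET[col_idx]
--     return cipher_char
--
-- def decrypt_quagmire_autokey(ciphertext, primer, mode="plain"):
--     tableau = build_tableau()
--     plaintext = ""
--     current_key = list(primer.upper())
--     for i, c in enumerate(ciphertext):
--         key_char = current_key[i] if i < len(current_key) else current_key[i]
--         p_char = decrypt_quagmire_char(c, key_char, tableau)
--         plaintext += p_char
--         if mode == "plain": current_key.append(p_char)
--         elif mode == "cipher": current_key.append(c)
--     return plaintext
-- ===== SOURCE B (Python) =====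
-- KRYPTOS_ALPHABET = "KRYPTOSABCDEFGHIJLMNQUVWXZ"
--
-- def _dec(c, k):
--     if c in KRYPTOS_ALPHABET and k in KRYPTOS_ALPHABET:
--         return KRYPTOS_ALPHABET[(KRYPTOS_ALPHABET.index(c) - KRYPTOS_ALPHABET.index(k)) % 26]
--     return c
--
-- def decrypt_quagmire_autokey(ciphertext, primer, mode="plain"):
--     # Staged, stream-based decryption: no tableau and no growing key list.
--     # cipher mode: the whole key stream is known up front (primer + ciphertext),
--     # so decryption is one zip; an unknown mode keys only from the primer;
--     # plain mode splits the text into len(primer) independent residue streams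
--     # (position i depends only on position i-n), decrypts each stream on its
--     # own, and interleaves the streams back.
--     key = primer.upper()
--     if mode == "cipher":
--         return "".join(_dec(c, k) for c, k in zip(ciphertext, key + ciphertext))
--     if mode != "plain":
--         return "".join(_dec(c, k) for c, k in zip(ciphertext, key))
--     n = len(key)
--     streams = []
--     for r in range(n):
--         k = key[r]
--         s = []
--         for i in range(r, len(ciphertext), n):
--             k = _dec(ciphertext[i], k)
--             s.append(k)
--         streams.append(s)
--     return "".join(streams[i % n][i // n] for i in range(len(ciphertext)))
-- ===== Notes on version B (the rewrite author's own statement) =====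
-- stated objective: alternative
-- what changed: B discards both the 26-row tableau and A's sequential loop over a growing current_key list: single characters are decrypted by closed-form modular arithmetic, cipher mode and unknown modes become one zip against a key stream that is fully known up front (primer+ciphertext resp. primer), and plain mode is decrypted per residue class modulo len(primer) (each stream chained independently, since position i only depends on position i-n) and the streams are interleaved back by index.
import Mathlib
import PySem

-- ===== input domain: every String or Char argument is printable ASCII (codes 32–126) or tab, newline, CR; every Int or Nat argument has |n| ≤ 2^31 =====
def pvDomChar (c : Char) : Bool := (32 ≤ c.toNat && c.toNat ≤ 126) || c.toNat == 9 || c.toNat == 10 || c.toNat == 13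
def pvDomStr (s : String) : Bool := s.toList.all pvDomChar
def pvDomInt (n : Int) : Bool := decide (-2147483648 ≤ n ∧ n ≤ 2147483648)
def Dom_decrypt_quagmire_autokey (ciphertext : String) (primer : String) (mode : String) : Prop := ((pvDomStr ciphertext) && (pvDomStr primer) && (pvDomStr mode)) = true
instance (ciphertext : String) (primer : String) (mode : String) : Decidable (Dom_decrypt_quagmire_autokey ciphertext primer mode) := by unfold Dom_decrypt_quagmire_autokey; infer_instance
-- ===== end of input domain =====

-- B replaces A's tableau-driven sequential autokey loop by staged, stream-based
-- decryption: cipher/unknown modes become one zip over a key stream known up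
-- front, and plain mode is decrypted per residue class mod len(primer) and
-- interleaved back (alternative structure; no growing key list, no tableau).

-- ===== PORT A =====
def pvAlpha : List Char := "KRYPTOSABCDEFGHIJLMNQUVWXZ".toList

def pvBuildTableau : List (List Char) :=
  (PySem.List.pyRange 0 26 1).foldl
    (fun tab i => tab ++ [PySem.List.slice pvAlpha (some i) none ++ PySem.List.slice pvAlpha none (some i)]) []

def pvDecryptChar (cipher_char key_char : Char) (tableau : List (List Char)) : Char :=
  if key_char ∉ pvAlpha ∨ cipher_char ∉ pvAlpha then cipher_char
  else
    let row_idx : Nat := (PySem.List.index? pvAlpha key_char).getD 0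
    let row : List Char := (PySem.List.pyGet? tableau (row_idx : Int)).getD []
    if cipher_char ∈ row then
      let col_idx : Nat := (PySem.List.index? row cipher_char).getD 0
      (PySem.List.pyGet? pvAlpha (col_idx : Int)).getD cipher_char
    else cipher_char

-- the loop body of A; `none` = the IndexError of current_key[i] (excluded by Pre_)
def pvStepA (mode : String) (tableau : List (List Char))
    (st : Option (List Char × List Char)) (ic : Int × Char) : Option (List Char × List Char) :=
  match st with
  | none => none
  | some (pt, key) =>
    match (if ic.1 < (key.length : Int) then PySem.List.pyGet? key ic.1 else PySem.List.pyGet? key ic.1) with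
    | none => none
    | some key_char =>
      let p := pvDecryptChar ic.2 key_char tableau
      some (pt ++ [p],
        if mode = "plain" then key ++ [p]
        else if mode = "cipher" then key ++ [ic.2]
        else key)

def decrypt_quagmire_autokey (ciphertext : String) (primer : String) (mode : String) : String :=
  let tableau := pvBuildTableau
  match (PySem.List.enumerate ciphertext.toList 0).foldl (pvStepA mode tableau)
      (some (([] : List Char), PySem.Chars.upper primer.toList)) with
  | none => ""          -- unreachable: Pre_ excludes the IndexError
  | some (pt, _) => String.ofList pt

-- ===== PORT B =====
-- Source B's _dec: closed-form single-character decryption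
def pvDec (c k : Char) : Char :=
  if c ∈ pvAlpha ∧ k ∈ pvAlpha then
    (PySem.List.pyGet? pvAlpha
      (PySem.Int.mod ((((PySem.List.index? pvAlpha c).getD 0 : Nat) : Int)
        - (((PySem.List.index? pvAlpha k).getD 0 : Nat) : Int)) 26)).getD c
  else c

-- Source B's inner residue-stream loop body (k, s are the two loop variables)
def pvStreamStep (cs : List Char) (st : Char × List Char) (i : Int) : Char × List Char :=
  let k' := pvDec ((PySem.List.pyGet? cs i).getD 'K') st.1
  (k', st.2 ++ [k'])

def decrypt_quagmire_autokey_alt (ciphertext : String) (primer : String) (mode : String) : String :=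
  let key := PySem.Chars.upper primer.toList
  let cs := ciphertext.toList
  if mode = "cipher" then
    String.ofList ((cs.zip (key ++ cs)).map (fun p => pvDec p.1 p.2))
  else if mode ≠ "plain" then
    String.ofList ((cs.zip key).map (fun p => pvDec p.1 p.2))
  else
    let n := key.length
    let streams : List (List Char) :=
      (PySem.List.pyRange 0 (n : Int) 1).foldl
        (fun streams r =>
          streams ++ [((PySem.List.pyRange r (cs.length : Int) (n : Int)).foldl
            (pvStreamStep cs) ((PySem.List.pyGet? key r).getD 'K', [])).2]) []
    String.ofList ((PySem.List.pyRange 0 (cs.length : Int) 1).map (fun i =>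
      (PySem.List.pyGet?
        ((PySem.List.pyGet? streams (PySem.Int.mod i (n : Int))).getD [])
        (PySem.Int.floordiv i (n : Int))).getD 'K'))

-- ===== PRECONDITION & SPEC =====
-- Pre_ excludes exactly the inputs where A raises IndexError reading current_key[i]:
-- an empty primer with nonempty ciphertext, and an unrecognised mode whose fixed key is shorter than the ciphertext.
def Pre_decrypt_quagmire_autokey (ciphertext : String) (primer : String) (mode : String) : Prop :=
  (ciphertext.toList = [] ∨ primer.toList ≠ []) ∧
  (mode = "plain" ∨ mode = "cipher" ∨ ciphertext.toList.length ≤ primer.toList.length)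
instance (ciphertext : String) (primer : String) (mode : String) : Decidable (Pre_decrypt_quagmire_autokey ciphertext primer mode) := by unfold Pre_decrypt_quagmire_autokey; infer_instance

def pvWitness_decrypt_quagmire_autokey : String × String × String := ("OBKR?UOX", "KRYPTOS", "plain")

def Spec_decrypt_quagmire_autokey (ciphertext : String) (primer : String) (mode : String) (out : String) : Prop := out = decrypt_quagmire_autokey_alt ciphertext primer mode
instance (ciphertext : String) (primer : String) (mode : String) (out : String) : Decidable (Spec_decrypt_quagmire_autokey ciphertext primer mode out) := by unfold Spec_decrypt_quagmire_autokey; infer_instance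

-- ===== CLAIM (what is proved, stated in full; the proofs are below) =====
def Claim_equal_decrypt_quagmire_autokey : Prop := ∀ (ciphertext : String) (primer : String) (mode : String), Dom_decrypt_quagmire_autokey ciphertext primer mode → Pre_decrypt_quagmire_autokey ciphertext primer mode → Spec_decrypt_quagmire_autokey ciphertext primer mode (decrypt_quagmire_autokey ciphertext primer mode)

-- ===== LEMMAS AND PROOFS =====

-- reference plaintext character at position i (plain-mode recurrence)
def pvRef (cs key : List Char) : Nat → Char
  | i =>
    if _h1 : i < key.length then pvDec (cs.getD i 'K') (key.getD i 'K')
    else if _h2 : key.length = 0 then cs.getD i 'K'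
    else pvDec (cs.getD i 'K') (pvRef cs key (i - key.length))
  termination_by i => i
  decreasing_by omega

lemma pvRef_lt {cs key : List Char} {i : Nat} (h : i < key.length) :
    pvRef cs key i = pvDec (cs.getD i 'K') (key.getD i 'K') := by
  rw [pvRef]; simp [h]

lemma pvRef_ge {cs key : List Char} {i : Nat} (h1 : ¬ i < key.length) (h2 : key.length ≠ 0) :
    pvRef cs key i = pvDec (cs.getD i 'K') (pvRef cs key (i - key.length)) := by
  rw [pvRef]; simp [h1, h2]

set_option maxRecDepth 4000 in
lemma pvCharTable_all :
    (pvAlpha.all fun k => pvAlpha.all fun c => pvDecryptChar c k pvBuildTableau == pvDec c k) = true := by rfl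

lemma pvCharEq (c k : Char) : pvDecryptChar c k pvBuildTableau = pvDec c k := by
  by_cases hk : k ∈ pvAlpha
  · by_cases hc : c ∈ pvAlpha
    · have h := pvCharTable_all
      rw [List.all_eq_true] at h
      have h2 := h k hk
      rw [List.all_eq_true] at h2
      exact eq_of_beq (h2 c hc)
    · simp [pvDecryptChar, pvDec, hc]
  · simp [pvDecryptChar, pvDec, hk]

-- the key character A reads in plain mode (key list = primer ++ output so far)
lemma pv_key_plain (keyHead out : List Char) (hk : keyHead ≠ []) :
    ∃ k, (keyHead ++ out)[out.length]? = some k ∧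
      k = (if out.length < keyHead.length then keyHead.getD out.length 'K'
           else out.getD (out.length - keyHead.length) 'K') := by
  by_cases h : out.length < keyHead.length
  · refine ⟨keyHead[out.length], ?_, ?_⟩
    · rw [List.getElem?_append_left h, List.getElem?_eq_getElem h]
    · rw [if_pos h, List.getD_eq_getElem _ _ h]
  · have hn : 0 < keyHead.length := List.length_pos_iff.mpr hk
    have h' : keyHead.length ≤ out.length := Nat.le_of_not_lt h
    have hlt : out.length - keyHead.length < out.length := by omega
    refine ⟨out[out.length - keyHead.length], ?_, ?_⟩
    · rw [List.getElem?_append_right h', List.getElem?_eq_getElem hlt]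
    · rw [if_neg h, List.getD_eq_getElem _ _ hlt]

-- A in plain mode produces the pvRef sequence
lemma pv_plain_A (key full : List Char) (hk : key ≠ []) :
    ∀ (cs out : List Char), out.length ≤ full.length → full.drop out.length = cs →
      out = (List.range out.length).map (pvRef full key) →
      (PySem.List.enumerate cs ((out.length : Nat) : Int)).foldl (pvStepA "plain" pvBuildTableau) (some (out, key ++ out))
      = some ((List.range full.length).map (pvRef full key),
              key ++ (List.range full.length).map (pvRef full key)) := by
  intro cs
  induction cs with
  | nil =>
    intro out hle hdrop hout
    have : full.length ≤ out.length := List.drop_eq_nil_iff.mp hdrop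
    have hlen : out.length = full.length := le_antisymm hle this
    rw [PySem.List.enumerate_nil, List.foldl_nil, ← hlen, ← hout]
  | cons c cs ih =>
    intro out hle hdrop hout
    set m := out.length with hm
    have hmlt : m < full.length := by
      by_contra h
      rw [List.drop_eq_nil_iff.mpr (by omega)] at hdrop
      exact List.cons_ne_nil c cs hdrop.symm
    have hcm : full[m]? = some c := by
      have h0 : (full.drop m)[0]? = some c := by rw [hdrop]; rfl
      rwa [List.getElem?_drop, Nat.add_zero] at h0
    have hcval : full.getD m 'K' = c := by
      rw [List.getD_eq_getElem?_getD, hcm]; rfl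
    have hdrop' : full.drop (m + 1) = cs := by
      have h1 : (full.drop m).tail = cs := by rw [hdrop]; rfl
      rw [← List.tail_drop, h1]
    obtain ⟨k, hA, hkval⟩ := pv_key_plain key out hk
    have hkref : pvDec c k = pvRef full key m := by
      by_cases h : m < key.length
      · rw [hkval, if_pos (by omega), pvRef_lt h, hcval]
      · have hn : key.length ≠ 0 := fun h0 => hk (List.eq_nil_of_length_eq_zero h0)
        have hlt : m - key.length < m := by omega
        have hod : out.getD (m - key.length) 'K' = pvRef full key (m - key.length) := by
          rw [hout, List.getD_eq_getElem?_getD]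
          simp [hlt]
        rw [hkval, if_neg (by omega), hod, pvRef_ge h hn, hcval]
    rw [PySem.List.enumerate_cons, List.foldl_cons]
    have hstep : pvStepA "plain" pvBuildTableau (some (out, key ++ out)) ((m : Int), c)
        = some (out ++ [pvRef full key m], key ++ (out ++ [pvRef full key m])) := by
      simp only [pvStepA, ite_self, PySem.List.pyGet?_natCast, hm, hA, pvCharEq, hkref]
      simp [List.append_assoc]
    rw [hstep]
    set p := pvRef full key m with hp
    have hout' : out ++ [p] = (List.range (m + 1)).map (pvRef full key) := by
      rw [List.range_succ, List.map_append, ← hout]; rfl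
    have hlen' : (out ++ [p]).length = m + 1 := by simp [← hm]
    have := ih (out ++ [p]) (by omega) (by rw [hlen', hdrop']) (by rw [hlen', ← hout'])
    rw [hlen'] at this
    have hcast : ((m : Nat) : Int) + 1 = ((m + 1 : Nat) : Int) := by omega
    rw [hcast]
    exact this

-- A in cipher mode: character j is decrypted against (primer ++ ciphertext)[j]
lemma pv_cipher_A (key full : List Char) (hk : key ≠ []) :
    ∀ (cs out : List Char), out.length ≤ full.length → full.drop out.length = cs →
      out = (List.range out.length).map (fun j => pvDec (full.getD j 'K') ((key ++ full).getD j 'K')) →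
      (PySem.List.enumerate cs ((out.length : Nat) : Int)).foldl (pvStepA "cipher" pvBuildTableau) (some (out, key ++ full.take out.length))
      = some ((List.range full.length).map (fun j => pvDec (full.getD j 'K') ((key ++ full).getD j 'K')),
              key ++ full.take full.length) := by
  intro cs
  induction cs with
  | nil =>
    intro out hle hdrop hout
    have : full.length ≤ out.length := List.drop_eq_nil_iff.mp hdrop
    have hlen : out.length = full.length := le_antisymm hle this
    rw [PySem.List.enumerate_nil, List.foldl_nil, ← hlen, ← hout]
  | cons c cs ih =>
    intro out hle hdrop hout
    set m := out.length with hm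
    have hmlt : m < full.length := by
      by_contra h
      rw [List.drop_eq_nil_iff.mpr (by omega)] at hdrop
      exact List.cons_ne_nil c cs hdrop.symm
    have hcm : full[m]? = some c := by
      have h0 : (full.drop m)[0]? = some c := by rw [hdrop]; rfl
      rwa [List.getElem?_drop, Nat.add_zero] at h0
    have hcval : full.getD m 'K' = c := by
      rw [List.getD_eq_getElem?_getD, hcm]; rfl
    have hdrop' : full.drop (m + 1) = cs := by
      have h1 : (full.drop m).tail = cs := by rw [hdrop]; rfl
      rw [← List.tail_drop, h1]
    have hn : 0 < key.length := List.length_pos_iff.mpr hk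
    have htl : (full.take m).length = m := List.length_take_of_le (by omega)
    obtain ⟨k, hA, hkval⟩ := pv_key_plain key (full.take m) hk
    rw [htl] at hA hkval
    have hkey : k = (key ++ full).getD m 'K' := by
      by_cases h : m < key.length
      · rw [hkval, if_pos h, List.getD_eq_getElem?_getD, List.getD_eq_getElem?_getD,
          List.getElem?_append_left h]
      · have hlt : m - key.length < m := by omega
        rw [hkval, if_neg h, List.getD_eq_getElem?_getD, List.getD_eq_getElem?_getD,
          List.getElem?_append_right (by omega), List.getElem?_take_of_lt (by omega)]
    rw [PySem.List.enumerate_cons, List.foldl_cons]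
    have htake : full.take m ++ [c] = full.take (m + 1) := by
      rw [List.take_add_one, hcm]; rfl
    set p := pvDec (full.getD m 'K') ((key ++ full).getD m 'K') with hp
    have hpk : pvDec c k = p := by rw [hkey, ← hcval, hp]
    have hstep : pvStepA "cipher" pvBuildTableau (some (out, key ++ full.take m)) ((m : Int), c)
        = some (out ++ [p], key ++ full.take (m + 1)) := by
      simp only [pvStepA, ite_self, PySem.List.pyGet?_natCast, hA, pvCharEq, hpk]
      rw [← htake]
      simp [List.append_assoc]
    rw [hstep]
    have hout' : out ++ [p] = (List.range (m + 1)).map (fun j => pvDec (full.getD j 'K') ((key ++ full).getD j 'K')) := by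
      rw [List.range_succ, List.map_append, ← hout]; rfl
    have hlen' : (out ++ [p]).length = m + 1 := by simp [← hm]
    have := ih (out ++ [p]) (by omega) (by rw [hlen', hdrop']) (by rw [hlen', ← hout'])
    rw [hlen'] at this
    have hcast : ((m : Nat) : Int) + 1 = ((m + 1 : Nat) : Int) := by omega
    rw [hcast]
    exact this

-- A in any other mode: the key stays the primer (ciphertext fits under it by Pre_)
lemma pv_other_A (mode : String) (key full : List Char)
    (hm1 : mode ≠ "plain") (hm2 : mode ≠ "cipher") (hfit : full.length ≤ key.length) :
    ∀ (cs out : List Char), out.length ≤ full.length → full.drop out.length = cs →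
      out = (List.range out.length).map (fun j => pvDec (full.getD j 'K') (key.getD j 'K')) →
      (PySem.List.enumerate cs ((out.length : Nat) : Int)).foldl (pvStepA mode pvBuildTableau) (some (out, key))
      = some ((List.range full.length).map (fun j => pvDec (full.getD j 'K') (key.getD j 'K')), key) := by
  intro cs
  induction cs with
  | nil =>
    intro out hle hdrop hout
    have : full.length ≤ out.length := List.drop_eq_nil_iff.mp hdrop
    have hlen : out.length = full.length := le_antisymm hle this
    rw [PySem.List.enumerate_nil, List.foldl_nil, ← hlen, ← hout]
  | cons c cs ih =>
    intro out hle hdrop hout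
    set m := out.length with hm
    have hmlt : m < full.length := by
      by_contra h
      rw [List.drop_eq_nil_iff.mpr (by omega)] at hdrop
      exact List.cons_ne_nil c cs hdrop.symm
    have hcm : full[m]? = some c := by
      have h0 : (full.drop m)[0]? = some c := by rw [hdrop]; rfl
      rwa [List.getElem?_drop, Nat.add_zero] at h0
    have hcval : full.getD m 'K' = c := by
      rw [List.getD_eq_getElem?_getD, hcm]; rfl
    have hdrop' : full.drop (m + 1) = cs := by
      have h1 : (full.drop m).tail = cs := by rw [hdrop]; rfl
      rw [← List.tail_drop, h1]
    have hmk : m < key.length := by omega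
    have hA : key[m]? = some key[m] := List.getElem?_eq_getElem hmk
    have hkd : pvDec c key[m] = pvDec (full.getD m 'K') (key.getD m 'K') := by
      rw [hcval, List.getD_eq_getElem _ _ hmk]
    rw [PySem.List.enumerate_cons, List.foldl_cons]
    set p := pvDec (full.getD m 'K') (key.getD m 'K') with hp
    have hstep : pvStepA mode pvBuildTableau (some (out, key)) ((m : Int), c)
        = some (out ++ [p], key) := by
      simp only [pvStepA, ite_self, PySem.List.pyGet?_natCast, hA, pvCharEq, hkd]
      simp [if_neg hm1, if_neg hm2]
    rw [hstep]
    have hout' : out ++ [p] = (List.range (m + 1)).map (fun j => pvDec (full.getD j 'K') (key.getD j 'K')) := by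
      rw [List.range_succ, List.map_append, ← hout]; rfl
    have hlen' : (out ++ [p]).length = m + 1 := by simp [← hm]
    have := ih (out ++ [p]) (by omega) (by rw [hlen', hdrop']) (by rw [hlen', ← hout'])
    rw [hlen'] at this
    have hcast : ((m : Nat) : Int) + 1 = ((m + 1 : Nat) : Int) := by omega
    rw [hcast]
    exact this

-- a zip-map of characters as a map over positions
lemma pv_zip_map (f : Char → Char → Char) (xs ys : List Char) (h : xs.length ≤ ys.length) :
    (xs.zip ys).map (fun p => f p.1 p.2)
    = (List.range xs.length).map (fun j => f (xs.getD j 'K') (ys.getD j 'K')) := by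
  apply List.ext_getElem
  · simp [Nat.min_eq_left h]
  · intro i h1 h2
    have hx : i < xs.length := by simpa using h2
    have hy : i < ys.length := lt_of_lt_of_le hx h
    simp [List.getElem_zip, List.getD_eq_getElem?_getD, List.getElem?_eq_getElem hx, List.getElem?_eq_getElem hy]

-- number of iterations of B's inner loop for residue r (= len(range(r, L, n)))
def pvCnt (L n r : Nat) : Nat := (L - r + n - 1) / n

lemma pvCnt_eq (L n r : Nat) (hn : 0 < n) :
    (if (r : Int) < (L : Int) then (((L : Int) - r + n - 1) / n).toNat else 0) = pvCnt L n r := by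
  by_cases h : r < L
  · rw [if_pos (by exact_mod_cast h)]
    have hc : (L : Int) - r + n - 1 = ((L - r + n - 1 : Nat) : Int) := by omega
    rw [hc, ← Int.natCast_div, Int.toNat_natCast, pvCnt]
  · rw [if_neg (by omega)]
    have h0 : L - r = 0 := by omega
    rw [pvCnt, h0, Nat.div_eq_of_lt (by omega)]

-- B's inner loop for residue r computes the pvRef values along its stream
lemma pv_stream (cs key : List Char) (r : Nat) (hr : r < key.length) (cnt : Nat) :
    (List.range cnt).foldl (fun st (k : Nat) => pvStreamStep cs st ((r : Int) + (key.length : Int) * (k : Nat)))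
      ((PySem.List.pyGet? key ((r : Nat) : Int)).getD 'K', [])
    = ((if cnt = 0 then (PySem.List.pyGet? key ((r : Nat) : Int)).getD 'K'
        else pvRef cs key (r + key.length * (cnt - 1))),
       (List.range cnt).map (fun t => pvRef cs key (r + key.length * t))) := by
  have hkd : (PySem.List.pyGet? key ((r : Nat) : Int)).getD 'K' = key.getD r 'K' := by
    rw [PySem.List.pyGet?_natCast, ← List.getD_eq_getElem?_getD]
  induction cnt with
  | zero => simp
  | succ s ihs =>
    rw [List.range_succ, List.foldl_append, ihs, List.foldl_cons, List.foldl_nil]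
    have hidx : (r : Int) + (key.length : Int) * ((s : Nat) : Int) = ((r + key.length * s : Nat) : Int) := by
      push_cast
      ring
    have hget : (PySem.List.pyGet? cs ((r : Int) + (key.length : Int) * ((s : Nat) : Int))).getD 'K'
        = cs.getD (r + key.length * s) 'K' := by
      rw [hidx, PySem.List.pyGet?_natCast, ← List.getD_eq_getElem?_getD]
    have hrefs : pvDec (cs.getD (r + key.length * s) 'K')
        (if s = 0 then (PySem.List.pyGet? key ((r : Nat) : Int)).getD 'K'
         else pvRef cs key (r + key.length * (s - 1)))
        = pvRef cs key (r + key.length * s) := by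
      by_cases hs : s = 0
      · subst hs
        rw [if_pos rfl, hkd]
        have h0 : r + key.length * 0 = r := by ring
        rw [h0, pvRef_lt hr]
      · have hnz : key.length ≠ 0 := by omega
        have h1 : 1 ≤ s := by omega
        have hge : ¬ (r + key.length * s < key.length) := by
          have := Nat.mul_le_mul_left key.length h1
          omega
        have hsub : r + key.length * s - key.length = r + key.length * (s - 1) := by
          have hms : key.length * s = key.length * (s - 1) + key.length := by
            cases s with
            | zero => omega
            | succ t => simp [Nat.mul_succ]
          omega
        rw [if_neg hs, pvRef_ge hge hnz, hsub]
    have h1 : ¬ (s + 1 = 0) := by omega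
    rw [if_neg h1]
    simp only [pvStreamStep, hget, hrefs]
    refine Prod.ext ?_ ?_
    · simp
    · simp only [List.map_append]
      rfl

-- B's plain branch equals the pvRef sequence
lemma pv_plain_B (cs key : List Char) (hk : key ≠ []) :
    (PySem.List.pyRange 0 ((cs).length : Int) 1).map (fun i =>
      (PySem.List.pyGet?
        ((PySem.List.pyGet?
          ((PySem.List.pyRange 0 ((key).length : Int) 1).foldl
            (fun streams r =>
              streams ++ [((PySem.List.pyRange r ((cs).length : Int) ((key).length : Int)).foldl
                (pvStreamStep cs) ((PySem.List.pyGet? key r).getD 'K', [])).2]) [])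
          (PySem.Int.mod i ((key).length : Int))).getD [])
        (PySem.Int.floordiv i ((key).length : Int))).getD 'K')
    = (List.range cs.length).map (pvRef cs key) := by
  have hn : 0 < key.length := List.length_pos_iff.mpr hk
  -- streams in closed form
  have hstreams : (PySem.List.pyRange 0 (key.length : Int) 1).foldl
      (fun streams r =>
        streams ++ [((PySem.List.pyRange r (cs.length : Int) (key.length : Int)).foldl
          (pvStreamStep cs) ((PySem.List.pyGet? key r).getD 'K', [])).2]) []
      = (List.range key.length).map (fun r =>
          (List.range (pvCnt cs.length key.length r)).map (fun t => pvRef cs key (r + key.length * t))) := by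
    rw [PySem.List.pyRange_one, List.foldl_map]
    have hcast : ((key.length : Int) - 0).toNat = key.length := by omega
    rw [hcast]
    rw [PySem.List.foldl_congr_mem _ _ (fun streams (r : Nat) =>
      streams ++ [(List.range (pvCnt cs.length key.length r)).map (fun t => pvRef cs key (r + key.length * t))]) _ ?_]
    · exact PySem.List.foldl_append_singleton_eq_map _ _ _
    · intro acc r hrmem
      have hr : r < key.length := List.mem_range.mp hrmem
      have h0 : (0 : Int) + (r : Nat) = ((r : Nat) : Int) := by omega
      rw [h0, PySem.List.pyRange_of_pos _ _ (by exact_mod_cast hn), List.foldl_map,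
        pvCnt_eq cs.length key.length r hn, pv_stream cs key r hr]
  rw [hstreams, PySem.List.pyRange_one]
  have hcast : ((cs.length : Int) - 0).toNat = cs.length := by omega
  rw [hcast, List.map_map]
  apply List.map_congr_left
  intro j hj
  have hjL : j < cs.length := List.mem_range.mp hj
  simp only [Function.comp]
  have h0 : (0 : Int) + (j : Nat) = ((j : Nat) : Int) := by omega
  rw [h0, PySem.Int.mod_natCast, PySem.Int.floordiv_natCast]
  have hr : j % key.length < key.length := Nat.mod_lt _ hn
  have hsel : (PySem.List.pyGet? ((List.range key.length).map (fun r =>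
      (List.range (pvCnt cs.length key.length r)).map (fun t => pvRef cs key (r + key.length * t))))
      ((j % key.length : Nat) : Int)).getD []
      = (List.range (pvCnt cs.length key.length (j % key.length))).map
          (fun t => pvRef cs key (j % key.length + key.length * t)) := by
    rw [PySem.List.pyGet?_natCast]
    simp [hr]
  rw [hsel]
  set r := j % key.length with hrdef
  set t := j / key.length with htdef
  have hj' : r + key.length * t = j := Nat.mod_add_div j key.length
  have htc : t < pvCnt cs.length key.length r := by
    rw [pvCnt]
    have hb : (t + 1) * key.length ≤ cs.length - r + key.length - 1 := by
      have hjlt : r + key.length * t < cs.length := by rw [hj']; exact hjL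
      have hx : (t + 1) * key.length = key.length * t + key.length := by ring
      rw [hx]
      generalize key.length * t = X at hjlt ⊢
      omega
    have := (Nat.le_div_iff_mul_le hn).mpr hb
    omega
  rw [PySem.List.pyGet?_natCast]
  simp only [List.getElem?_map, List.getElem?_range, htc]
  simp [hj']

lemma pv_upper_ne_nil {l : List Char} (h : l ≠ []) : PySem.Chars.upper l ≠ [] := by
  intro hu
  have hlen : (PySem.Chars.upper l).length = l.length := by simp [PySem.Chars.upper]
  rw [hu] at hlen
  exact h (List.eq_nil_of_length_eq_zero hlen.symm)

-- ===== VERDICT (by name: the statement is the Claim_ definition above) =====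
theorem decrypt_quagmire_autokey_spec : Claim_equal_decrypt_quagmire_autokey := by
  intro ct pr mode _ hpre
  unfold Spec_decrypt_quagmire_autokey
  obtain ⟨h1, h2⟩ := hpre
  simp only [decrypt_quagmire_autokey, decrypt_quagmire_autokey_alt]
  by_cases hct : ct.toList = []
  · rw [hct]
    split_ifs <;> simp [PySem.List.enumerate_nil, PySem.List.pyRange_one_eq_nil (le_refl 0)]
  · have hpr : pr.toList ≠ [] := by
      cases h1 with
      | inl h => exact absurd h hct
      | inr h => exact h
    have hk : PySem.Chars.upper pr.toList ≠ [] := pv_upper_ne_nil hpr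
    set key := PySem.Chars.upper pr.toList with hkey
    set cs := ct.toList with hcs
    by_cases hm1 : mode = "cipher"
    · rw [if_pos hm1, hm1]
      have hA := pv_cipher_A key cs hk cs [] (by simp) (by simp) (by simp)
      simp only [List.length_nil, Nat.cast_zero, List.take_zero, List.append_nil,
        List.take_length] at hA
      rw [hA]
      rw [pv_zip_map pvDec cs (key ++ cs) (by simp)]
    · rw [if_neg hm1]
      by_cases hm2 : mode = "plain"
      · rw [hm2]
        rw [if_neg (by simp)]
        have hA := pv_plain_A key cs hk cs [] (by simp) (by simp) (by simp)
        simp only [List.length_nil, Nat.cast_zero, List.append_nil] at hA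
        rw [hA, pv_plain_B cs key hk]
      · rw [if_pos hm2]
        have hfit : cs.length ≤ key.length := by
          rcases h2 with h | h | h
          · exact absurd h hm2
          · exact absurd h hm1
          · simpa [hkey, PySem.Chars.upper] using h
        have hA := pv_other_A mode key cs hm2 hm1 hfit cs [] (by simp) (by simp) (by simp)
        simp only [List.length_nil, Nat.cast_zero] at hA
        rw [hA, pv_zip_map pvDec cs key hfit]
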